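-- pv_equiv track=rewrite | github.com/K-kiron/NHL-Analysis | Milestone2/features/feature_eng2_bonus.py | binary2cumulative
-- ===== SOURCE A (Python) =====
-- def binary2cumulative(lst):
--     nlst = []
--     count = 0
--     for i in lst:
--         if i == 1:
--             count += 1
--         else:
--             count = 0
--         nlst.append(count)
--     return nlst
-- ===== SOURCE B (Python) =====
-- from itertools import groupby
--
-- def binary2cumulative(lst):
--     out = []
--     for is_one, grp in groupby(lst, key=lambda x: x == 1):
--         n = sum(1 for _ in grp)
--         out.extend(range(1, n + 1) if is_one else [0] * n)
--     return out
-- ===== Notes on version B (the rewrite author's own statement) =====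
-- stated objective: alternative
-- what changed: Instead of a single pass with a running reset counter, B decomposes the list into maximal runs via itertools.groupby and emits 1..n for each run of ones and n zeros for each other run.
import Mathlib
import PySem

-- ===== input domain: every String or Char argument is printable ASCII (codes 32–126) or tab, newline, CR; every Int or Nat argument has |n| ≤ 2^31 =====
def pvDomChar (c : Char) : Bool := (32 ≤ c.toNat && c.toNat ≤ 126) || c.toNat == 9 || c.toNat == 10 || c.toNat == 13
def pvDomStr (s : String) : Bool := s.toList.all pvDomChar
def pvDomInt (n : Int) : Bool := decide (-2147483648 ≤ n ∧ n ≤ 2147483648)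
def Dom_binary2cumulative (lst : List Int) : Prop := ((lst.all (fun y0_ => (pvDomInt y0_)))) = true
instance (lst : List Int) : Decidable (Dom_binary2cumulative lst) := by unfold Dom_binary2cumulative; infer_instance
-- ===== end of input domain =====

-- B replaces A's running reset-counter pass by a run-length decomposition (groupby):
-- each maximal run of ones emits 1..n, each other run emits n zeros (alternative decomposition).

-- ===== PORT A =====
-- A's loop: mutable count and nlst, appending after each element.
def binary2cumulativeGo (lst : List Int) (count : Int) (nlst : List Int) : List Int :=
  match lst with
  | [] => nlst
  | i :: rest =>
      let count' := if i = 1 then count + 1 else 0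
      binary2cumulativeGo rest count' (nlst ++ [count'])

def binary2cumulative (lst : List Int) : List Int :=
  binary2cumulativeGo lst 0 []

-- ===== PORT B =====
-- groupby: peel off the maximal run whose key (x == 1) matches b; returns (run length, remainder).
def pvRunLen (b : Bool) : List Int → Nat × List Int
  | [] => (0, [])
  | x :: rest =>
      if (x == 1) == b then
        ((pvRunLen b rest).1 + 1, (pvRunLen b rest).2)
      else (0, x :: rest)

theorem pvRunLen_length_le (b : Bool) (l : List Int) : (pvRunLen b l).2.length ≤ l.length := by
  induction l with
  | nil => simp [pvRunLen]
  | cons x rest ih =>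
      simp only [pvRunLen]
      split
      · simpa using Nat.le_succ_of_le ih
      · simp

-- the groupby loop of Source B: for each run, extend out with range(1,n+1) or n zeros.
def binary2cumulativeAltGo : List Int → List Int
  | [] => []
  | x :: rest =>
      let b := x == 1
      let p := pvRunLen b rest
      (if b then (List.range (p.1 + 1)).map (fun (k : Nat) => ((k : Int) + 1))
            else List.replicate (p.1 + 1) (0 : Int))
        ++ binary2cumulativeAltGo p.2
  termination_by l => l.length
  decreasing_by
    have := pvRunLen_length_le (x == 1) rest
    simp only [List.length_cons]
    omega

def binary2cumulative_alt (lst : List Int) : List Int :=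
  binary2cumulativeAltGo lst

-- ===== PRECONDITION & SPEC =====
def Spec_binary2cumulative (lst : List Int) (out : List Int) : Prop := out = binary2cumulative_alt lst
instance (lst : List Int) (out : List Int) : Decidable (Spec_binary2cumulative lst out) := by unfold Spec_binary2cumulative; infer_instance

-- ===== CLAIM (what is proved, stated in full; the proofs are below) =====
def Claim_equal_binary2cumulative : Prop := ∀ (lst : List Int), Dom_binary2cumulative lst → Spec_binary2cumulative lst (binary2cumulative lst)

-- ===== LEMMAS AND PROOFS =====

-- proof-only simple form of A: emit the updated count at each step.
def pvASimple : List Int → Int → List Int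
  | [], _ => []
  | i :: rest, c =>
      let c' := if i = 1 then c + 1 else 0
      c' :: pvASimple rest c'

theorem binary2cumulativeGo_eq (lst : List Int) :
    ∀ (c : Int) (nlst : List Int),
      binary2cumulativeGo lst c nlst = nlst ++ pvASimple lst c := by
  induction lst with
  | nil => intro c nlst; simp [binary2cumulativeGo, pvASimple]
  | cons i rest ih =>
      intro c nlst
      simp [binary2cumulativeGo, pvASimple, ih, List.append_assoc]

-- the remainder of a run is empty or starts with an element of the opposite key.
theorem pvRunLen_rest (b : Bool) (l : List Int) :
    ∀ n r, pvRunLen b l = (n, r) → r = [] ∨ ∃ y ys, r = y :: ys ∧ ((y == 1) == b) = false := by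
  induction l with
  | nil =>
      intro n r h
      simp only [pvRunLen, Prod.mk.injEq] at h
      left; exact h.2.symm
  | cons x rest ih =>
      intro n r h
      by_cases hk : ((x == 1) == b) = true
      · rw [pvRunLen, if_pos hk] at h
        simp only [Prod.mk.injEq] at h
        exact ih _ _ (by rw [← h.2])
      · rw [pvRunLen, if_neg hk] at h
        simp only [Prod.mk.injEq] at h
        right
        exact ⟨x, rest, h.2.symm, by simpa using hk⟩

-- a ones-run of length n under count c emits c+1 .. c+n, then continues with count c+n.
theorem pvASimple_ones (l : List Int) :
    ∀ (c : Int) (n : Nat) (r : List Int), pvRunLen true l = (n, r) →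
      pvASimple l c
        = (List.range n).map (fun (k : Nat) => c + ((k : Int) + 1)) ++ pvASimple r (c + (n : Int)) := by
  induction l with
  | nil =>
      intro c n r h
      simp only [pvRunLen, Prod.mk.injEq] at h
      obtain ⟨hn, hr⟩ := h
      subst hn; subst hr
      simp [pvASimple]
  | cons x rest ih =>
      intro c n r h
      by_cases hx : x = 1
      · have hk : ((x == 1) == true) = true := by simp [hx]
        rw [pvRunLen, if_pos hk] at h
        rcases hm : pvRunLen true rest with ⟨m, r'⟩
        rw [hm] at h
        simp only [Prod.mk.injEq] at h
        obtain ⟨hn, hr⟩ := h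
        subst hn; subst hr
        rw [show pvASimple (x :: rest) c = (c + 1) :: pvASimple rest (c + 1) by
              simp [pvASimple, hx]]
        rw [ih (c + 1) m r' hm, List.range_succ_eq_map]
        simp only [List.map_cons, List.map_map, List.cons_append, List.cons.injEq]
        constructor
        · simp
        · have h1 : (fun (k : Nat) => c + 1 + ((k : Int) + 1))
              = ((fun (k : Nat) => c + ((k : Int) + 1)) ∘ Nat.succ) := by
            funext k
            simp only [Function.comp_apply]
            omega
          rw [h1, show c + 1 + (m : Int) = c + ((m + 1 : Nat) : Int) by push_cast; ring]
      · have hk : ¬ ((x == 1) == true) = true := by simp [hx]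
        rw [pvRunLen, if_neg hk] at h
        simp only [Prod.mk.injEq] at h
        obtain ⟨hn, hr⟩ := h
        subst hn; subst hr
        simp

-- a non-ones-run starting at count 0 emits n zeros, then continues with count 0.
theorem pvASimple_zeros (l : List Int) :
    ∀ (n : Nat) (r : List Int), pvRunLen false l = (n, r) →
      pvASimple l 0 = List.replicate n (0 : Int) ++ pvASimple r 0 := by
  induction l with
  | nil =>
      intro n r h
      simp only [pvRunLen, Prod.mk.injEq] at h
      obtain ⟨hn, hr⟩ := h
      subst hn; subst hr
      simp [pvASimple]
  | cons x rest ih =>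
      intro n r h
      by_cases hx : x = 1
      · have hk : ¬ ((x == 1) == false) = true := by simp [hx]
        rw [pvRunLen, if_neg hk] at h
        simp only [Prod.mk.injEq] at h
        obtain ⟨hn, hr⟩ := h
        subst hn; subst hr
        simp
      · have hk : ((x == 1) == false) = true := by simp [hx]
        rw [pvRunLen, if_pos hk] at h
        rcases hm : pvRunLen false rest with ⟨m, r'⟩
        rw [hm] at h
        simp only [Prod.mk.injEq] at h
        obtain ⟨hn, hr⟩ := h
        subst hn; subst hr
        rw [show pvASimple (x :: rest) 0 = (0 : Int) :: pvASimple rest 0 by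
              simp [pvASimple, hx]]
        rw [ih m r' hm]
        simp [List.replicate_succ]

-- after a ones-run the incoming count is irrelevant (the next element is not 1).
theorem pvASimple_after_ones (l : List Int) (n : Nat) (r : List Int)
    (h : pvRunLen true l = (n, r)) (c : Int) : pvASimple r c = pvASimple r 0 := by
  rcases pvRunLen_rest true l n r h with hr | ⟨y, ys, hr, hk⟩
  · simp [hr, pvASimple]
  · have hy : ¬ y = 1 := by simpa using hk
    simp [hr, pvASimple, hy]

theorem altGo_eq_aux : ∀ (N : Nat) (l : List Int), l.length ≤ N →
    binary2cumulativeAltGo l = pvASimple l 0 := by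
  intro N
  induction N with
  | zero =>
      intro l hl
      rw [List.length_eq_zero_iff.mp (Nat.le_zero.mp hl)]
      simp [binary2cumulativeAltGo, pvASimple]
  | succ N ih =>
      intro l hl
      match l with
      | [] => simp [binary2cumulativeAltGo, pvASimple]
      | x :: rest =>
          rw [binary2cumulativeAltGo]
          rcases hm : pvRunLen (x == 1) rest with ⟨m, r⟩
          have hrlen : r.length ≤ N := by
            have hle := pvRunLen_length_le (x == 1) rest
            rw [hm] at hle
            simp only [List.length_cons] at hl
            simp only at hle
            omega
          dsimp only
          rw [ih r hrlen]
          by_cases hx : x = 1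
          · have hb : (x == 1) = true := by simp [hx]
            rw [hb] at hm
            have hrun : pvRunLen true (x :: rest) = (m + 1, r) := by
              rw [pvRunLen, if_pos (by simp [hx]), hm]
            rw [pvASimple_ones (x :: rest) 0 (m + 1) r hrun,
                pvASimple_after_ones (x :: rest) (m + 1) r hrun (0 + ((m + 1 : Nat) : Int))]
            rw [hb]
            simp
          · have hb : (x == 1) = false := by simp [hx]
            rw [hb] at hm
            have hrun : pvRunLen false (x :: rest) = (m + 1, r) := by
              rw [pvRunLen, if_pos (by simp [hx]), hm]
            rw [pvASimple_zeros (x :: rest) (m + 1) r hrun]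
            rw [hb]
            simp

-- ===== VERDICT (by name: the statement is the Claim_ definition above) =====
theorem binary2cumulative_spec : Claim_equal_binary2cumulative := by
  intro lst _
  unfold Spec_binary2cumulative binary2cumulative binary2cumulative_alt
  rw [binary2cumulativeGo_eq, altGo_eq_aux lst.length lst le_rfl]
  simp
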